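-- pv_equiv track=rewrite | github.com/MrBrantCode/unitest_baseline | mut_generate/mist_train_taco/taco_14641/solution.py | count_equal_case_substrings
-- ===== SOURCE A (Python) =====
-- def count_equal_case_substrings(S: str) -> int:
--     count = 0
--     for i in range(len(S)):
--         upper = 0
--         lower = 0
--         if S[i].isupper():
--             upper += 1
--         else:
--             lower += 1
--         for j in range(i + 1, len(S)):
--             if S[j].isupper():
--                 upper += 1
--             else:
--                 lower += 1
--             if upper == lower:
--                 count += 1
--     return count
-- ===== SOURCE B (Python) =====
-- def count_equal_case_substrings(S: str) -> int:
--     # O(n): +1/-1 prefix sums; each equal pair of prefix values is one balanced substring.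
--     count = 0
--     p = 0
--     seen = {0: 1}
--     for ch in S:
--         p += 1 if ch.isupper() else -1
--         c = seen.get(p, 0)
--         count += c
--         seen[p] = c + 1
--     return count
-- ===== Notes on version B (the rewrite author's own statement) =====
-- stated objective: faster
-- what changed: Replaced the quadratic scan over all start positions with a single pass that maps each character to +1 (upper) / -1 (other), keeps the running prefix sum, and counts equal prefix-sum values with a hash map.
import Mathlib
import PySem

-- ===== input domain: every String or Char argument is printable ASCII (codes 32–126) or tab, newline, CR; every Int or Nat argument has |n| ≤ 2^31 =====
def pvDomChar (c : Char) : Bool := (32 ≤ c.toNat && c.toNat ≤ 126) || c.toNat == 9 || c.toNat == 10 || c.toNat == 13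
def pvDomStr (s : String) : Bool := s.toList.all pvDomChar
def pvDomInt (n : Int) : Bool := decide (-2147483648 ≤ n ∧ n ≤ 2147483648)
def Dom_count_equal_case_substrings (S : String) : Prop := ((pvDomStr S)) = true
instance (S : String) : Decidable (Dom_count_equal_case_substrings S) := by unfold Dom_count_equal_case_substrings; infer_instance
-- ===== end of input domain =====

-- B replaces A's quadratic scan over all start positions by one linear pass counting equal
-- (+1/-1)-prefix-sum values in a dict; same return value, proved equal on all inputs.

-- ===== PORT A =====
-- literal transliteration of A's nested loops; S[i]/S[j] are always in range, so
-- the Option from pyGet? is read with getD (the default branch is unreachable)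
def count_equal_case_substrings (S : String) : Int :=
  let n : Int := PySem.Str.len S
  (PySem.List.pyRange 0 n).foldl (fun count i =>
    let c0 := (PySem.Str.pyGet? S i).getD ' '
    let upper : Int := if PySem.Chars.isupper c0 then 1 else 0
    let lower : Int := if PySem.Chars.isupper c0 then 0 else 1
    ((PySem.List.pyRange (i + 1) n).foldl (fun (st : Int × Int × Int) j =>
        let cj := (PySem.Str.pyGet? S j).getD ' '
        let u := if PySem.Chars.isupper cj then st.1 + 1 else st.1
        let l := if PySem.Chars.isupper cj then st.2.1 else st.2.1 + 1
        (u, l, if u = l then st.2.2 + 1 else st.2.2))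
      (upper, lower, count)).2.2) 0

-- ===== PORT B =====
-- literal transliteration of Source B: one pass, running prefix sum p, dict 'seen' of
-- prefix-value multiplicities seeded with {0: 1}
def count_equal_case_substrings_alt (S : String) : Int :=
  (S.toList.foldl (fun (st : Int × PySem.Dict Int Int × Int) ch =>
      let p := st.1 + (if PySem.Chars.isupper ch then 1 else -1)
      let c := st.2.1.getD p 0
      (p, st.2.1.insert p (c + 1), st.2.2 + c))
    (0, PySem.Dict.empty.insert 0 1, 0)).2.2

-- ===== PRECONDITION & SPEC =====
def Spec_count_equal_case_substrings (S : String) (out : Int) : Prop := out = count_equal_case_substrings_alt S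
instance (S : String) (out : Int) : Decidable (Spec_count_equal_case_substrings S out) := by unfold Spec_count_equal_case_substrings; infer_instance

-- ===== CLAIM (what is proved, stated in full; the proofs are below) =====
def Claim_equal_count_equal_case_substrings : Prop := ∀ (S : String), Dom_count_equal_case_substrings S → Spec_count_equal_case_substrings S (count_equal_case_substrings S)

-- ===== LEMMAS AND PROOFS =====

-- the +1/-1 value of a character
def pvVal (c : Char) : Int := if PySem.Chars.isupper c then 1 else -1

theorem pvVal_ne_zero (c : Char) : pvVal c ≠ 0 := by
  unfold pvVal; split <;> omega

-- prefix sums of a character list starting from p (P(1), …, P(n))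
def pvPsums (p : Int) : List Char → List Int
  | [] => []
  | c :: t => (p + pvVal c) :: pvPsums (p + pvVal c) t

-- number of pairs i < j with L[i] = L[j], scanning suffixes
def pvSp : List Int → Int
  | [] => 0
  | x :: xs => (xs.count x : Int) + pvSp xs

-- inner-loop value of A: prefixes of ts whose running sum cancels d
def pvZeros (d : Int) : List Char → Int
  | [] => 0
  | c :: t => (if d + pvVal c = 0 then 1 else 0) + pvZeros (d + pvVal c) t

-- outer-loop value of A, structurally on the suffix
def pvOuter : List Char → Int
  | [] => 0
  | c :: t => pvZeros (pvVal c) t + pvOuter t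

theorem pvCount_psums (ts : List Char) : ∀ (e d : Int),
    ((pvPsums e ts).count d : Int) = pvZeros (e - d) ts := by
  induction ts with
  | nil => intro e d; simp [pvPsums, pvZeros]
  | cons c t ih =>
    intro e d
    simp only [pvPsums, pvZeros, List.count_cons, beq_iff_eq]
    rw [show e - d + pvVal c = e + pvVal c - d from by ring]
    have ih' := ih (e + pvVal c) d
    by_cases h : e + pvVal c = d
    · rw [h] at ih' ⊢
      rw [if_pos rfl, if_pos (show d - d = 0 from by ring)]
      push_cast
      omega
    · rw [if_neg h, if_neg (show ¬ (e + pvVal c - d = 0) from by omega)]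
      push_cast
      omega

theorem pvOuter_eq_sp (cs : List Char) : ∀ (d : Int),
    pvSp (d :: pvPsums d cs) = pvOuter cs := by
  induction cs with
  | nil => intro d; simp [pvPsums, pvSp, pvOuter]
  | cons c t ih =>
    intro d
    simp only [pvPsums, pvOuter, pvSp, List.count_cons, beq_iff_eq]
    have hne : ¬ (d + pvVal c = d) := by have := pvVal_ne_zero c; omega
    have h1 : ((pvPsums (d + pvVal c) t).count d : Int) = pvZeros (pvVal c) t := by
      rw [pvCount_psums t (d + pvVal c) d, show d + pvVal c - d = pvVal c from by ring]
    have h2 := ih (d + pvVal c)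
    simp only [pvSp] at h2
    simp only [hne, if_false]
    push_cast
    omega

-- ---------- A side ----------

theorem pvInner (cs : List Char) : ∀ (m k : Nat) (u l cnt : Int), cs.length - k = m →
    ((PySem.List.pyRange (k : Int) (cs.length : Int)).foldl (fun (st : Int × Int × Int) j =>
        (if PySem.Chars.isupper ((PySem.List.pyGet? cs j).getD ' ') then st.1 + 1 else st.1,
         if PySem.Chars.isupper ((PySem.List.pyGet? cs j).getD ' ') then st.2.1 else st.2.1 + 1,
         if (if PySem.Chars.isupper ((PySem.List.pyGet? cs j).getD ' ') then st.1 + 1 else st.1)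
            = (if PySem.Chars.isupper ((PySem.List.pyGet? cs j).getD ' ') then st.2.1 else st.2.1 + 1)
         then st.2.2 + 1 else st.2.2)) (u, l, cnt)).2.2
      = cnt + pvZeros (u - l) (cs.drop k) := by
  intro m
  induction m with
  | zero =>
    intro k u l cnt hk
    have h2 : PySem.List.pyRange (k : Int) (cs.length : Int) = [] := by
      simp [PySem.List.pyRange]; omega
    have h3 : cs.drop k = [] := List.drop_eq_nil_of_le (by omega)
    simp [h2, h3, pvZeros]
  | succ m ih =>
    intro k u l cnt hk
    have hlt : k < cs.length := by omega
    rw [PySem.List.pyRange_one_cons (by exact_mod_cast hlt)]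
    have hget : PySem.List.pyGet? cs (k : Int) = some cs[k] := by
      rw [PySem.List.pyGet?_natCast]; simp [hlt]
    have hdrop : cs.drop k = cs[k] :: cs.drop (k + 1) := List.drop_eq_getElem_cons hlt
    have hcast : (k : Int) + 1 = ((k + 1 : Nat) : Int) := by push_cast; ring
    simp only [List.foldl_cons, hget, Option.getD_some, hcast]
    by_cases hu : PySem.Chars.isupper cs[k]
    · simp only [hu, if_true]
      by_cases h : u + 1 = l
      · rw [if_pos h, ih (k + 1) (u + 1) l (cnt + 1) (by omega), hdrop]
        simp only [pvZeros, pvVal, hu, if_true]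
        rw [if_pos (by omega), show u + 1 - l = u - l + 1 from by ring]
        ring
      · rw [if_neg h, ih (k + 1) (u + 1) l cnt (by omega), hdrop]
        simp only [pvZeros, pvVal, hu, if_true]
        rw [if_neg (by omega), show u + 1 - l = u - l + 1 from by ring]
        ring
    · simp only [hu, Bool.false_eq_true, if_false]
      by_cases h : u = l + 1
      · rw [if_pos h, ih (k + 1) u (l + 1) (cnt + 1) (by omega), hdrop]
        simp only [pvZeros, pvVal, hu, Bool.false_eq_true, if_false]
        rw [show u - l + -1 = u - (l + 1) from by ring,
            if_pos (show u - (l + 1) = 0 from by omega)]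
        ring
      · rw [if_neg h, ih (k + 1) u (l + 1) cnt (by omega), hdrop]
        simp only [pvZeros, pvVal, hu, Bool.false_eq_true, if_false]
        rw [show u - l + -1 = u - (l + 1) from by ring,
            if_neg (show ¬ (u - (l + 1) = 0) from by omega)]
        ring

theorem pvOuterFold (cs : List Char) : ∀ (m k : Nat) (cnt : Int), cs.length - k = m →
    ((PySem.List.pyRange (k : Int) (cs.length : Int)).foldl (fun count i =>
      ((PySem.List.pyRange (i + 1) (cs.length : Int)).foldl (fun (st : Int × Int × Int) j =>
        (if PySem.Chars.isupper ((PySem.List.pyGet? cs j).getD ' ') then st.1 + 1 else st.1,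
         if PySem.Chars.isupper ((PySem.List.pyGet? cs j).getD ' ') then st.2.1 else st.2.1 + 1,
         if (if PySem.Chars.isupper ((PySem.List.pyGet? cs j).getD ' ') then st.1 + 1 else st.1)
            = (if PySem.Chars.isupper ((PySem.List.pyGet? cs j).getD ' ') then st.2.1 else st.2.1 + 1)
         then st.2.2 + 1 else st.2.2))
        (if PySem.Chars.isupper ((PySem.List.pyGet? cs i).getD ' ') then 1 else 0,
         if PySem.Chars.isupper ((PySem.List.pyGet? cs i).getD ' ') then 0 else 1,
         count)).2.2) cnt)
      = cnt + pvOuter (cs.drop k) := by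
  intro m
  induction m with
  | zero =>
    intro k cnt hk
    have h2 : PySem.List.pyRange (k : Int) (cs.length : Int) = [] := by
      simp [PySem.List.pyRange]; omega
    have h3 : cs.drop k = [] := List.drop_eq_nil_of_le (by omega)
    simp [h2, h3, pvOuter]
  | succ m ih =>
    intro k cnt hk
    have hlt : k < cs.length := by omega
    rw [PySem.List.pyRange_one_cons (by exact_mod_cast hlt)]
    have hget : PySem.List.pyGet? cs (k : Int) = some cs[k] := by
      rw [PySem.List.pyGet?_natCast]; simp [hlt]
    have hcast : (k : Int) + 1 = ((k + 1 : Nat) : Int) := by push_cast; ring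
    have hdrop : cs.drop k = cs[k] :: cs.drop (k + 1) := List.drop_eq_getElem_cons hlt
    simp only [List.foldl_cons, hget, Option.getD_some, hcast]
    rw [pvInner cs (cs.length - (k + 1)) (k + 1) _ _ cnt rfl]
    rw [ih (k + 1) _ (by omega), hdrop]
    simp only [pvOuter, pvVal]
    by_cases hu : PySem.Chars.isupper cs[k]
    · simp only [hu, if_true]
      rw [show (1 : Int) - 0 = 1 from by ring]; ring
    · simp only [hu, Bool.false_eq_true, if_false]
      rw [show (0 : Int) - 1 = -1 from by ring]; ring

-- ---------- B side ----------

theorem pvSumGetDInsert (X : List Int) (d : PySem.Dict Int Int) (x : Int) :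
    (X.map (fun y => (d.insert x (d.getD x 0 + 1)).getD y 0)).sum
      = (X.map (fun y => d.getD y 0)).sum + (X.count x : Int) := by
  induction X with
  | nil => simp
  | cons y t ih =>
    simp only [List.map_cons, List.sum_cons, List.count_cons, beq_iff_eq]
    rw [ih, PySem.Dict.getD_insert]
    by_cases h : y = x
    · subst h; rw [if_pos rfl, if_pos rfl]; push_cast; ring
    · rw [if_neg h, if_neg h]; push_cast; ring

theorem pvAltFold (ts : List Char) : ∀ (p : Int) (d : PySem.Dict Int Int) (cnt : Int),
    (ts.foldl (fun (st : Int × PySem.Dict Int Int × Int) ch =>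
        (st.1 + (if PySem.Chars.isupper ch then 1 else -1),
         st.2.1.insert (st.1 + (if PySem.Chars.isupper ch then 1 else -1))
           (st.2.1.getD (st.1 + (if PySem.Chars.isupper ch then 1 else -1)) 0 + 1),
         st.2.2 + st.2.1.getD (st.1 + (if PySem.Chars.isupper ch then 1 else -1)) 0)) (p, d, cnt)).2.2
      = cnt + ((pvPsums p ts).map (fun y => d.getD y 0)).sum + pvSp (pvPsums p ts) := by
  induction ts with
  | nil => intro p d cnt; simp [pvPsums, pvSp]
  | cons c t ih =>
    intro p d cnt
    have hv : p + (if PySem.Chars.isupper c then (1 : Int) else -1) = p + pvVal c := by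
      simp [pvVal]
    simp only [List.foldl_cons, hv]
    rw [ih (p + pvVal c) _ (cnt + d.getD (p + pvVal c) 0)]
    simp only [pvPsums, pvSp, List.map_cons, List.sum_cons, pvSumGetDInsert]
    ring

-- ===== VERDICT (by name: the statement is the Claim_ definition above) =====
theorem count_equal_case_substrings_spec : Claim_equal_count_equal_case_substrings := by
  intro S _
  unfold Spec_count_equal_case_substrings
  have hA := pvOuterFold S.toList S.toList.length 0 0 rfl
  rw [Nat.cast_zero, List.drop_zero] at hA
  have hB := pvAltFold S.toList 0 (PySem.Dict.empty.insert 0 1) 0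
  -- the ports are definitionally the two folds the lemmas speak about
  have e1 : count_equal_case_substrings S = 0 + pvOuter S.toList := hA
  have e2 : count_equal_case_substrings_alt S
      = 0 + ((pvPsums 0 S.toList).map (fun y => (PySem.Dict.empty.insert 0 1).getD y 0)).sum
          + pvSp (pvPsums 0 S.toList) := hB
  have h3 := pvSumGetDInsert (pvPsums 0 S.toList) PySem.Dict.empty 0
  simp only [PySem.Dict.getD_empty, zero_add, List.map_const', List.sum_replicate, smul_zero] at h3
  rw [e1, e2, h3]
  have h := pvOuter_eq_sp S.toList 0
  simp only [pvSp] at h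
  omega
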